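-- pv_equiv track=rewrite | github.com/jamesbmayr/advent_of_code_2021 | day14.py | get_range_of_counts
-- ===== SOURCE A (Python) =====
-- def get_range_of_counts(polymer):
-- 	"""given a polymer, what is the difference between frequency of most and least common elements"""
--
-- 	letters = list(polymer)
-- 	counts = {}
-- 	for letter in letters:
-- 		if letter in counts.keys():
-- 			counts[letter] += 1
-- 		else:
-- 			counts[letter] = 1
--
-- 	letter_keys = list(counts.keys())
-- 	letter_keys.sort(key=lambda x: counts[x], reverse=True)
--
-- 	return counts[letter_keys[0]] - counts[letter_keys[len(letter_keys) - 1]]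
-- ===== SOURCE B (Python) =====
-- def get_range_of_counts(polymer):
-- 	"""given a polymer, what is the difference between frequency of most and least common elements"""
--
-- 	counts = {}
-- 	for letter in polymer:
-- 		counts[letter] = counts.get(letter, 0) + 1
--
-- 	return max(counts.values()) - min(counts.values())
-- ===== Notes on version B (the rewrite author's own statement) =====
-- stated objective: simpler
-- what changed: B builds the frequency table with dict.get and takes max(values) - min(values) directly, instead of A's sort of the keys by count (reverse) followed by indexing the first and last key.
import Mathlib
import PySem

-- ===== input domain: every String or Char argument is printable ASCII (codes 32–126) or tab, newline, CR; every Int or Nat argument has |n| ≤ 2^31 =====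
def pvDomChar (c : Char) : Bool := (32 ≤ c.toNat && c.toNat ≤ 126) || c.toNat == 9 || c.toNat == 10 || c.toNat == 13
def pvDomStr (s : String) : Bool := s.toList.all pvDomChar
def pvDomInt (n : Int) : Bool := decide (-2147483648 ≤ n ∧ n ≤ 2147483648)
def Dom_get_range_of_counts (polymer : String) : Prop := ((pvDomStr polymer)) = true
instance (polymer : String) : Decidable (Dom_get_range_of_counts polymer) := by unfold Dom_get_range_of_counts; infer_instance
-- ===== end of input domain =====

-- B replaces A's sort-keys-by-count-and-index-first/last with a direct max/min over the count values (simpler, no sort).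


-- ===== PORT A =====
def get_range_of_counts (polymer : String) : Int :=
  let letters := polymer.toList
  let counts := letters.foldl
    (fun d letter =>
      if d.keys.contains letter then d.insert letter (d.getD letter 0 + 1)
      else d.insert letter 1)
    (∅ : PySem.Dict Char Int)
  let letter_keys := PySem.List.sorted counts.keys (fun x => counts.getD x 0) true
  match PySem.List.pyGet? letter_keys 0,
        PySem.List.pyGet? letter_keys ((letter_keys.length : Int) - 1) with
  | some k0, some k1 => counts.getD k0 0 - counts.getD k1 0
  | some _, none => 0   -- IndexError in Python: excluded by Pre_
  | none, some _ => 0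
  | none, none => 0

-- ===== PORT B =====
def get_range_of_counts_alt (polymer : String) : Int :=
  let counts := polymer.toList.foldl
    (fun d letter => d.insert letter (d.getD letter 0 + 1))
    (∅ : PySem.Dict Char Int)
  match PySem.List.max? counts.values id with
  | none => 0   -- ValueError in Python: excluded by Pre_
  | some mx =>
    match PySem.List.min? counts.values id with
    | none => 0
    | some mn => mx - mn

-- ===== PRECONDITION & SPEC =====
-- Pre_ excludes only the empty string, on which both Pythons raise (A IndexError, B ValueError).
def Pre_get_range_of_counts (polymer : String) : Prop := polymer ≠ ""
instance (polymer : String) : Decidable (Pre_get_range_of_counts polymer) := by unfold Pre_get_range_of_counts; infer_instance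
def pvWitness_get_range_of_counts : String := "ABAC"

def Spec_get_range_of_counts (polymer : String) (out : Int) : Prop := out = get_range_of_counts_alt polymer
instance (polymer : String) (out : Int) : Decidable (Spec_get_range_of_counts polymer out) := by unfold Spec_get_range_of_counts; infer_instance

-- ===== CLAIM (what is proved, stated in full; the proofs are below) =====
def Claim_equal_get_range_of_counts : Prop := ∀ (polymer : String), Dom_get_range_of_counts polymer → Pre_get_range_of_counts polymer → Spec_get_range_of_counts polymer (get_range_of_counts polymer)

-- ===== LEMMAS AND PROOFS =====

-- A's guarded counting step equals B's unguarded one: when the key is absent, getD yields 0.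
lemma pv_stepAB (d : PySem.Dict Char Int) (x : Char) :
    (if d.keys.contains x then d.insert x (d.getD x 0 + 1) else d.insert x 1)
      = d.insert x (d.getD x 0 + 1) := by
  split_ifs with h
  · rfl
  · have hg : d.getD x 0 = 0 := by
      have hfind : d.items.find? (fun p => p.1 == x) = none := by
        rw [List.find?_eq_none]
        intro p hp hbeq
        exact h (List.mem_map.mpr ⟨p, hp, by simpa using (beq_iff_eq.mp hbeq)⟩ |> fun hm => by
          simpa [PySem.Dict.keys, List.contains_iff_mem] using hm)
      simp [PySem.Dict.getD, PySem.Dict.get?, hfind]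
    rw [hg]; norm_num

-- Both ports build the same dictionary: PySem.Dict.counter of the letters.
lemma pv_foldA_eq_counter (cs : List Char) :
    cs.foldl
      (fun d letter =>
        if d.keys.contains letter then d.insert letter (d.getD letter 0 + 1)
        else d.insert letter 1)
      (∅ : PySem.Dict Char Int)
      = PySem.Dict.counter cs := by
  have hfun : (fun (d : PySem.Dict Char Int) letter =>
      if d.keys.contains letter then d.insert letter (d.getD letter 0 + 1)
      else d.insert letter 1)
    = (fun (d : PySem.Dict Char Int) letter => d.modify letter 0 (fun v => v + 1)) := by
    funext d l
    simpa [PySem.Dict.modify] using pv_stepAB d l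
  rw [hfun]; rfl

lemma pv_foldB_eq_counter (cs : List Char) :
    cs.foldl (fun d letter => d.insert letter (d.getD letter 0 + 1)) (∅ : PySem.Dict Char Int)
      = PySem.Dict.counter cs := by
  have hfun : (fun (d : PySem.Dict Char Int) letter => d.insert letter (d.getD letter 0 + 1))
    = (fun (d : PySem.Dict Char Int) letter => d.modify letter 0 (fun v => v + 1)) := by
    funext d l; simp [PySem.Dict.modify]
  rw [hfun]; rfl

-- head of a descending-by-key list bounds all elements from above
lemma pv_head_max {f : Char → Int} {s : List Char}
    (hp : List.Pairwise (fun a b => f b ≤ f a) s) (hs : s ≠ []) :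
    ∀ y ∈ s, f y ≤ f (s.head hs) := by
  cases s with
  | nil => exact absurd rfl hs
  | cons h t =>
    intro y hy
    rcases List.mem_cons.mp hy with rfl | hyt
    · simp
    · exact (List.pairwise_cons.mp hp).1 y hyt

-- head of an ascending-by-key list bounds all elements from below
lemma pv_head_min {f : Char → Int} {s : List Char}
    (hp : List.Pairwise (fun a b => f a ≤ f b) s) (hs : s ≠ []) :
    ∀ y ∈ s, f (s.head hs) ≤ f y := by
  cases s with
  | nil => exact absurd rfl hs
  | cons h t =>
    intro y hy
    rcases List.mem_cons.mp hy with rfl | hyt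
    · simp
    · exact (List.pairwise_cons.mp hp).1 y hyt

-- last of a descending-by-key list bounds all elements from below
lemma pv_last_min {f : Char → Int} {s : List Char}
    (hp : List.Pairwise (fun a b => f b ≤ f a) s) (hs : s ≠ []) :
    ∀ y ∈ s, f (s.getLast hs) ≤ f y := by
  have hrev : List.Pairwise (fun a b => f a ≤ f b) s.reverse := by
    rw [List.pairwise_reverse]; exact hp
  have hsr : s.reverse ≠ [] := by simpa using hs
  have hhead : s.getLast hs = s.reverse.head hsr := by
    rw [List.getLast_eq_head_reverse]
  intro y hy
  rw [hhead]
  exact pv_head_min hrev hsr y (List.mem_reverse.mpr hy)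

-- foldl of a none-avoiding step from a some-accumulator stays some
lemma pv_foldl_go {g : Option Int → Int → Option Int}
    (hg : ∀ a x, ∃ b, g (some a) x = some b) :
    ∀ (t : List Int) (a : Int), ∃ m, List.foldl g (some a) t = some m := by
  intro t
  induction t with
  | nil => intro a; exact ⟨a, rfl⟩
  | cons y t ih =>
    intro a
    obtain ⟨b, hb⟩ := hg a y
    rw [List.foldl_cons, hb]
    exact ih b

lemma pv_max?_some {xs : List Int} (h : xs ≠ []) : ∃ m, PySem.List.max? xs id = some m := by
  rcases List.exists_cons_of_ne_nil h with ⟨a, t, rfl⟩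
  show ∃ m, List.foldl _ (none : Option Int) (a :: t) = some m
  rw [List.foldl_cons]
  exact pv_foldl_go (fun a x => by dsimp only; exact ⟨if id a < id x then x else a, by split <;> rfl⟩) t a

lemma pv_min?_some {xs : List Int} (h : xs ≠ []) : ∃ m, PySem.List.min? xs id = some m := by
  rcases List.exists_cons_of_ne_nil h with ⟨a, t, rfl⟩
  show ∃ m, List.foldl _ (none : Option Int) (a :: t) = some m
  rw [List.foldl_cons]
  exact pv_foldl_go (fun a x => by dsimp only; exact ⟨if id x < id a then x else a, by split <;> rfl⟩) t a

-- list indexing on a nonempty list: position 0 is the head, position length-1 the last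
lemma pv_pyGet?_zero (l : List Char) (h : l ≠ []) :
    PySem.List.pyGet? l 0 = some (l.head h) := by
  cases l with
  | nil => exact absurd rfl h
  | cons a t => simp [PySem.List.pyGet?, PySem.List.pyIdx?]

lemma pv_pyGet?_last (l : List Char) (h : l ≠ []) :
    PySem.List.pyGet? l ((l.length : Int) - 1) = some (l.getLast h) := by
  cases l with
  | nil => exact absurd rfl h
  | cons a t =>
    have hlen : (((a :: t).length : Int) - 1) = ((t.length : Nat) : Int) := by simp
    rw [hlen, PySem.List.pyGet?_natCast]
    have hlt : t.length < (a :: t).length := by simp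
    rw [List.getElem?_eq_getElem hlt]
    congr 1
    rw [List.getLast_eq_getElem]
    congr 1

-- ===== VERDICT (by name: the statement is the Claim_ definition above) =====
theorem get_range_of_counts_spec : Claim_equal_get_range_of_counts := by
  intro polymer _ hpre
  unfold Spec_get_range_of_counts
  have hcs : polymer.toList ≠ [] := by
    intro h
    exact hpre (String.toList_inj.mp (by simpa using h))
  set cs := polymer.toList with hcsdef
  set f : Char → Int := fun k => ((cs.count k : Nat) : Int) with hfdef
  have hkey : (fun x => (PySem.Dict.counter cs).getD x 0) = f :=
    funext fun x => PySem.Dict.getD_counter cs x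
  have hkeys : (PySem.Dict.counter cs).keys = PySem.Set.ofList cs :=
    PySem.Dict.keys_counter cs
  have hvalues : (PySem.Dict.counter cs).values = (PySem.Set.ofList cs).map f := by
    simp [PySem.Dict.values, PySem.Dict.items_counter, List.map_map, hfdef, Function.comp]
  set K := PySem.Set.ofList cs with hKdef
  have hK : K ≠ [] := by
    rcases List.exists_cons_of_ne_nil hcs with ⟨c, t, hct⟩
    have : c ∈ K := by
      rw [hKdef]
      exact (PySem.Set.mem_ofList cs c).mpr (by rw [hct]; exact List.mem_cons_self)
    exact List.ne_nil_of_mem this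
  have hperm : (PySem.List.sorted K f true).Perm K := PySem.List.sorted_perm K f true
  have hs : PySem.List.sorted K f true ≠ [] := by
    intro h
    exact hK (List.Perm.nil_eq (h ▸ hperm)).symm
  have hpair : List.Pairwise (fun a b => f b ≤ f a) (PySem.List.sorted K f true) :=
    PySem.List.sorted_pairwise_rev K f
  -- B side: max/min of the values exist
  have hV : (K.map f) ≠ [] := by
    rcases List.exists_cons_of_ne_nil hK with ⟨c, t, hct⟩
    rw [hct]; simp
  obtain ⟨M, hM⟩ := pv_max?_some hV
  obtain ⟨m, hm⟩ := pv_min?_some hV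
  -- the head of the reverse-sorted keys carries the max count, the last the min
  have hhead_mem : (PySem.List.sorted K f true).head hs ∈ PySem.List.sorted K f true :=
    List.head_mem hs
  have hlast_mem : (PySem.List.sorted K f true).getLast hs ∈ PySem.List.sorted K f true :=
    List.getLast_mem hs
  have hMa : M = f ((PySem.List.sorted K f true).head hs) := by
    apply le_antisymm
    · have hMmem := PySem.List.max?_mem hM
      rcases List.mem_map.mp hMmem with ⟨k, hkK, rfl⟩
      exact pv_head_max hpair hs k (hperm.mem_iff.mpr hkK)
    · have : f ((PySem.List.sorted K f true).head hs) ∈ K.map f :=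
        List.mem_map_of_mem (hperm.mem_iff.mp hhead_mem)
      exact PySem.List.max?_isMax hM _ this
  have hml : m = f ((PySem.List.sorted K f true).getLast hs) := by
    apply le_antisymm
    · have : f ((PySem.List.sorted K f true).getLast hs) ∈ K.map f :=
        List.mem_map_of_mem (hperm.mem_iff.mp hlast_mem)
      exact PySem.List.min?_isMin hm _ this
    · have hmmem := PySem.List.min?_mem hm
      rcases List.mem_map.mp hmmem with ⟨k, hkK, rfl⟩
      exact pv_last_min hpair hs k (hperm.mem_iff.mpr hkK)
  -- evaluate both ports
  show get_range_of_counts polymer = get_range_of_counts_alt polymer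
  unfold get_range_of_counts get_range_of_counts_alt
  simp only [← hcsdef, pv_foldA_eq_counter, pv_foldB_eq_counter, hkeys, hkey, hvalues,
    pv_pyGet?_zero _ hs, pv_pyGet?_last _ hs, hM, hm]
  rw [hMa, hml]
  have hgeta : (PySem.Dict.counter cs).getD ((PySem.List.sorted K f true).head hs) 0
      = f ((PySem.List.sorted K f true).head hs) := PySem.Dict.getD_counter cs _
  have hgetl : (PySem.Dict.counter cs).getD ((PySem.List.sorted K f true).getLast hs) 0
      = f ((PySem.List.sorted K f true).getLast hs) := PySem.Dict.getD_counter cs _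
  rw [hgeta, hgetl]
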